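-- pv_equiv track=rewrite | github.com/sayali251220/codes | A4_Q3.py | find_long_sequences
-- ===== SOURCE A (Python) =====
-- def find_long_sequences(dna_sequence, threshold):
--     current_sequence = []
--     long_sequences = []
--     for base in dna_sequence:
--         if base in ['A', 'T', 'C', 'G']:  # Only count valid bases
--             current_sequence.append(base)
--         else:
--             if len(current_sequence) > threshold:
--                 long_sequences.append(''.join(current_sequence))
--             current_sequence = []
--
--     if len(current_sequence) > threshold:  # For the last sequence
--         long_sequences.append(''.join(current_sequence))
--
--     return long_sequences
-- ===== SOURCE B (Python) =====
-- def find_long_sequences(dna_sequence, threshold):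
--     # Staged pipeline: translate every non-base character to one sentinel,
--     # let str.split cut the string at sentinels (keeping empty pieces, like
--     # the original's flush-on-separator), then filter by length.
--     marked = ''.join(b if b in ('A', 'T', 'C', 'G') else '\x00' for b in dna_sequence)
--     return [p for p in marked.split('\x00') if len(p) > threshold]
-- ===== Notes on version B (the rewrite author's own statement) =====
-- stated objective: idiomatic
-- what changed: Replaces the stateful character loop (current-run accumulator, flush-on-separator, duplicated post-loop flush) with a staged pipeline: translate every non-base character to a sentinel, cut the string with str.split, then filter the pieces by length.
import Mathlib
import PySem

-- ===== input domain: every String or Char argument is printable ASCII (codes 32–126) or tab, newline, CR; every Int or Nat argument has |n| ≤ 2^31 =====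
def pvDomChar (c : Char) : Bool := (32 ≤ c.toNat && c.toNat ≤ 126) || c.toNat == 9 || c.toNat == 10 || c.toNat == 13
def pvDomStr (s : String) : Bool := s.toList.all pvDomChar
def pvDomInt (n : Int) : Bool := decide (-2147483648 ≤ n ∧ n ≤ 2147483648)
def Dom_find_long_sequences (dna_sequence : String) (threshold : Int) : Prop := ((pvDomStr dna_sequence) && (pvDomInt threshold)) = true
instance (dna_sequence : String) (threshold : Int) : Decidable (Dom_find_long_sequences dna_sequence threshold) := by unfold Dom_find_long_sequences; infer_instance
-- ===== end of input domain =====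

-- B (idiomatic): replaces the stateful run-accumulator loop with a staged pipeline —
-- translate non-bases to a sentinel, split on the sentinel, filter pieces by length.

-- ===== PORT A =====
-- loop body of A: append valid base to current_sequence, else flush it (if long) and reset
def pvStepA (threshold : Int) (st : List Char × List String) (base : Char) : List Char × List String :=
  if base ∈ ['A', 'T', 'C', 'G'] then
    (st.1 ++ [base], st.2)
  else
    if (st.1.length : Int) > threshold then ([], st.2 ++ [String.ofList st.1]) else ([], st.2)

def find_long_sequences (dna_sequence : String) (threshold : Int) : List String :=
  let st := dna_sequence.toList.foldl (pvStepA threshold) ([], [])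
  if (st.1.length : Int) > threshold then st.2 ++ [String.ofList st.1] else st.2

-- ===== PORT B =====
-- b if b in ('A','T','C','G') else '\x00'
def pvMark (b : Char) : Char := if b ∈ ['A', 'T', 'C', 'G'] then b else '\x00'

def find_long_sequences_alt (dna_sequence : String) (threshold : Int) : List String :=
  let marked := String.ofList (dna_sequence.toList.map pvMark)
  -- marked.split('\x00'); the separator is non-empty, so split? is always `some`
  let pieces := (PySem.Str.split? marked "\x00").getD []
  pieces.filter (fun p => PySem.Str.len p > threshold)

-- ===== PRECONDITION & SPEC =====
def Spec_find_long_sequences (dna_sequence : String) (threshold : Int) (out : List String) : Prop := out = find_long_sequences_alt dna_sequence threshold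
instance (dna_sequence : String) (threshold : Int) (out : List String) : Decidable (Spec_find_long_sequences dna_sequence threshold out) := by unfold Spec_find_long_sequences; infer_instance

-- ===== CLAIM (what is proved, stated in full; the proofs are below) =====
def Claim_equal_find_long_sequences : Prop := ∀ (dna_sequence : String) (threshold : Int), Dom_find_long_sequences dna_sequence threshold → Spec_find_long_sequences dna_sequence threshold (find_long_sequences dna_sequence threshold)

-- ===== LEMMAS AND PROOFS =====

-- structural recursion equivalent of splitting on the sentinel character
def pvConsHead (c : Char) : List (List Char) → List (List Char)
  | [] => [[c]]
  | p :: ps => (c :: p) :: ps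

def pvSplit : List Char → List (List Char)
  | [] => [[]]
  | c :: r => if c = '\x00' then [] :: pvSplit r else pvConsHead c (pvSplit r)

-- prepend a run onto the first piece
def pvMerge (x : List Char) : List (List Char) → List (List Char)
  | [] => [x]
  | p :: ps => (x ++ p) :: ps

-- keep the long pieces, as strings
def pvPost (t : Int) (ps : List (List Char)) : List String :=
  (ps.filter (fun p => (p.length : Int) > t)).map String.ofList

def pvFlush (t : Int) (st : List Char × List String) : List String :=
  if (st.1.length : Int) > t then st.2 ++ [String.ofList st.1] else st.2

theorem pvSplit_ne_nil (l : List Char) : pvSplit l ≠ [] := by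
  cases l with
  | nil => simp [pvSplit]
  | cons c r =>
    simp only [pvSplit]
    split
    · simp
    · cases h : pvSplit r <;> simp [pvConsHead]

theorem pvMerge_nil (ps : List (List Char)) (h : ps ≠ []) : pvMerge [] ps = ps := by
  cases ps with
  | nil => exact absurd rfl h
  | cons p t => simp [pvMerge]

theorem pvMerge_consHead (x : List Char) (c : Char) (ps : List (List Char)) :
    pvMerge x (pvConsHead c ps) = pvMerge (x ++ [c]) ps := by
  cases ps <;> simp [pvMerge, pvConsHead]

-- PySem's splitOn computes pvSplit for the one-character sentinel separator
theorem pvGo_eq : ∀ (fuel : Nat) (l : List Char), l.length < fuel → ∀ (cur : List Char) (acc : List (List Char)),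
    PySem.Chars.splitOn.go ['\x00'] fuel l cur acc = acc.reverse ++ pvMerge cur.reverse (pvSplit l) := by
  intro fuel
  induction fuel with
  | zero => intro l h; omega
  | succ f ih =>
    intro l h cur acc
    cases l with
    | nil => simp [PySem.Chars.splitOn.go, pvSplit, pvMerge]
    | cons c rest =>
      simp only [PySem.Chars.splitOn.go]
      by_cases hc : c = '\x00'
      · subst hc
        have hpre : List.isPrefixOf ['\x00'] ('\x00' :: rest) = true := by
          simp [List.isPrefixOf]
        simp only [hpre, if_true, List.length_cons, List.length_nil, Nat.zero_add,
          List.drop_succ_cons, List.drop_zero] at *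
        rw [ih rest (by simpa using Nat.lt_of_succ_lt_succ h) [] (cur.reverse :: acc)]
        simp only [pvSplit, pvMerge]
        cases hps : pvSplit rest with
        | nil => exact absurd hps (pvSplit_ne_nil rest)
        | cons p ps => simp
      · have hpre : List.isPrefixOf ['\x00'] (c :: rest) = false := by
          simp [List.isPrefixOf]
          intro hh; exact hc hh.symm
        simp only [hpre, Bool.false_eq_true, if_false]
        rw [ih rest (by simpa using Nat.lt_of_succ_lt_succ h) (c :: cur) acc]
        simp [pvSplit, hc, pvMerge_consHead]

theorem pvSplitOn_eq (l : List Char) : PySem.Chars.splitOn l ['\x00'] = pvSplit l := by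
  show PySem.Chars.splitOn.go ['\x00'] (l.length + 1) l [] [] = pvSplit l
  rw [pvGo_eq (l.length + 1) l (by omega) [] []]
  simp [pvMerge_nil _ (pvSplit_ne_nil l)]

-- the invariant: A's fold over the rest of the string, from state (cur, out), produces
-- out followed by the long pieces of (cur merged onto the sentinel-split of the rest)
theorem pvKey (t : Int) : ∀ (l : List Char) (cur : List Char) (out : List String),
    pvFlush t (l.foldl (pvStepA t) (cur, out)) = out ++ pvPost t (pvMerge cur (pvSplit (l.map pvMark))) := by
  intro l
  induction l with
  | nil =>
    intro cur out
    simp only [List.foldl_nil, List.map_nil, pvSplit, pvMerge, pvFlush, pvPost]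
    by_cases h : (cur.length : Int) > t <;> simp [h, List.filter]
  | cons c l ih =>
    intro cur out
    simp only [List.foldl_cons, List.map_cons]
    by_cases hv : c ∈ ['A', 'T', 'C', 'G']
    · have hm : pvMark c = c := by simp [pvMark, hv]
      have hc : ¬ c = '\x00' := by
        simp only [List.mem_cons] at hv
        rcases hv with h | h | h | h | h <;> first | (subst h; decide) | simp at h
      have hA : pvStepA t (cur, out) c = (cur ++ [c], out) := by simp [pvStepA, hv]
      rw [hA, ih, hm]
      simp [pvSplit, hc, pvMerge_consHead]
    · have hm : pvMark c = '\x00' := by simp [pvMark, hv]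
      have hA : pvStepA t (cur, out) c =
          ([], if (cur.length : Int) > t then out ++ [String.ofList cur] else out) := by
        simp only [pvStepA, hv, if_false]
        by_cases h : (cur.length : Int) > t <;> simp [h]
      rw [hA, ih, hm]
      rw [pvMerge_nil _ (pvSplit_ne_nil _)]
      simp only [pvSplit, if_true, pvMerge, List.append_nil]
      by_cases h : (cur.length : Int) > t <;> simp [h, pvPost, List.filter]

-- ===== VERDICT (by name: the statement is the Claim_ definition above) =====
theorem find_long_sequences_spec : Claim_equal_find_long_sequences := by
  intro s t _
  show find_long_sequences s t = find_long_sequences_alt s t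
  have h := pvKey t s.toList [] []
  simp only [pvFlush] at h
  unfold find_long_sequences find_long_sequences_alt
  rw [h]
  rw [pvMerge_nil _ (pvSplit_ne_nil _)]
  simp [PySem.Str.split?, PySem.Chars.split?, pvSplitOn_eq, pvPost, PySem.Str.len,
    List.filter_map, Function.comp_def]
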